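-- pv_equiv track=rewrite | github.com/saad-aids/cyber-suraksha | backend/nodes/evidence.py | extract_bank_from_utr
-- ===== SOURCE A (Python) =====
-- def extract_bank_from_utr(utr: str) -> str:
--     """Attempt to identify bank from UTR prefix"""
--     utr_upper = utr.upper().strip()
--
--     bank_prefixes = {
--         "SBIN": "State Bank of India",
--         "HDFC": "HDFC Bank",
--         "ICIC": "ICICI Bank",
--         "AXIS": "Axis Bank",
--         "PUNB": "Punjab National Bank",
--         "BARB": "Bank of Baroda",
--         "MAHB": "Bank of Maharashtra",
--         "CNRB": "Canara Bank",
--         "UBIN": "Union Bank of India",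
--         "KKBK": "Kotak Mahindra Bank"
--     }
--
--     for prefix, bank in bank_prefixes.items():
--         if utr_upper.startswith(prefix):
--             return bank
--
--     return None
-- ===== SOURCE B (Python) =====
-- def _candidate(c: str):
--     # Decision tree keyed on the first character: every bank prefix begins
--     # with a distinct letter, so one branch picks the only possible match.
--     if c == 'S':
--         return ("SBIN", "State Bank of India")
--     if c == 'H':
--         return ("HDFC", "HDFC Bank")
--     if c == 'I':
--         return ("ICIC", "ICICI Bank")
--     if c == 'A':
--         return ("AXIS", "Axis Bank")
--     if c == 'P':
--         return ("PUNB", "Punjab National Bank")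
--     if c == 'B':
--         return ("BARB", "Bank of Baroda")
--     if c == 'M':
--         return ("MAHB", "Bank of Maharashtra")
--     if c == 'C':
--         return ("CNRB", "Canara Bank")
--     if c == 'U':
--         return ("UBIN", "Union Bank of India")
--     if c == 'K':
--         return ("KKBK", "Kotak Mahindra Bank")
--     return None
--
--
-- def extract_bank_from_utr(utr: str) -> str:
--     u = utr.upper().strip()
--     if not u:
--         return None
--     cand = _candidate(u[0])
--     if cand is None:
--         return None
--     prefix, bank = cand
--     return bank if u.startswith(prefix) else None
-- ===== Notes on version B (the rewrite author's own statement) =====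
-- stated objective: alternative
-- what changed: Replaces the scan over the whole prefix table with a first-character decision tree: since all ten bank prefixes start with distinct letters, B dispatches on the first character of the normalized string to the single possible candidate and performs exactly one prefix comparison.
import Mathlib
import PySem

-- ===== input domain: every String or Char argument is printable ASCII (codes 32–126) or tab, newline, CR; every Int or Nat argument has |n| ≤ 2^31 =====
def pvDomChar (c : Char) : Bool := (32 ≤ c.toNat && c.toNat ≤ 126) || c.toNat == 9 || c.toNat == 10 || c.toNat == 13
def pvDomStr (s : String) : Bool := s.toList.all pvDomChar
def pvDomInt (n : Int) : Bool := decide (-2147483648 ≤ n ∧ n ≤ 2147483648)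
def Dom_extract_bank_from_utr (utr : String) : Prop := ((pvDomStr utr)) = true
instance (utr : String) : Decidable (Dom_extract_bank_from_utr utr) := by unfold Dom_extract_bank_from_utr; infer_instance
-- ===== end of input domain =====

-- B replaces A's scan over the ten-entry prefix table with a first-character
-- decision tree (all prefixes start with distinct letters), doing one prefix
-- comparison; objective: alternative.


-- ===== PORT A =====
-- the dict literal's items, in insertion order
def pvBankPairsA : List (String × String) :=
  [("SBIN", "State Bank of India"), ("HDFC", "HDFC Bank"), ("ICIC", "ICICI Bank"),
   ("AXIS", "Axis Bank"), ("PUNB", "Punjab National Bank"), ("BARB", "Bank of Baroda"),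
   ("MAHB", "Bank of Maharashtra"), ("CNRB", "Canara Bank"), ("UBIN", "Union Bank of India"),
   ("KKBK", "Kotak Mahindra Bank")]

-- 'for prefix, bank in bank_prefixes.items(): if utr_upper.startswith(prefix): return bank'
def pvScanA (u : List Char) : List (String × String) → Option String
  | [] => none
  | (p, b) :: rest => if PySem.Chars.startswith u p.toList then some b else pvScanA u rest

def extract_bank_from_utr (utr : String) : Option String :=
  pvScanA (PySem.Chars.strip (PySem.Chars.upper utr.toList)) pvBankPairsA

-- ===== PORT B =====
-- B's _candidate: dispatch on the first character to the only possible prefix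
def pvCandB (c : Char) : Option (String × String) :=
  if c = 'S' then some ("SBIN", "State Bank of India")
  else if c = 'H' then some ("HDFC", "HDFC Bank")
  else if c = 'I' then some ("ICIC", "ICICI Bank")
  else if c = 'A' then some ("AXIS", "Axis Bank")
  else if c = 'P' then some ("PUNB", "Punjab National Bank")
  else if c = 'B' then some ("BARB", "Bank of Baroda")
  else if c = 'M' then some ("MAHB", "Bank of Maharashtra")
  else if c = 'C' then some ("CNRB", "Canara Bank")
  else if c = 'U' then some ("UBIN", "Union Bank of India")
  else if c = 'K' then some ("KKBK", "Kotak Mahindra Bank")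
  else none

def extract_bank_from_utr_alt (utr : String) : Option String :=
  match PySem.Chars.strip (PySem.Chars.upper utr.toList) with
  | [] => none
  | c :: rest =>
    match pvCandB c with
    | none => none
    | some (p, b) =>
      if PySem.Chars.startswith (c :: rest) p.toList then some b else none

-- ===== PRECONDITION & SPEC =====
def Spec_extract_bank_from_utr (utr : String) (out : Option String) : Prop := out = extract_bank_from_utr_alt utr
instance (utr : String) (out : Option String) : Decidable (Spec_extract_bank_from_utr utr out) := by unfold Spec_extract_bank_from_utr; infer_instance

-- ===== CLAIM (what is proved, stated in full; the proofs are below) =====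
def Claim_equal_extract_bank_from_utr : Prop := ∀ (utr : String), Dom_extract_bank_from_utr utr → Spec_extract_bank_from_utr utr (extract_bank_from_utr utr)

-- ===== LEMMAS AND PROOFS =====

-- a startswith test on a cons splits into a head test and a tail test
theorem pv_sw_cons (c p0 : Char) (u ps : List Char) :
    PySem.Chars.startswith (c :: u) (p0 :: ps)
      = ((p0 == c) && PySem.Chars.startswith u ps) := by
  rw [Bool.eq_iff_iff]
  simp [PySem.Chars.startswith_iff, List.cons_prefix_cons]

theorem pv_sw_nil (p0 : Char) (ps : List Char) :
    PySem.Chars.startswith [] (p0 :: ps) = false := by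
  rw [Bool.eq_iff_iff]
  simp [PySem.Chars.startswith_iff]

-- the ten prefix literals as character lists
theorem pv_tl_SBIN : ("SBIN" : String).toList = ['S', 'B', 'I', 'N'] := rfl
theorem pv_tl_HDFC : ("HDFC" : String).toList = ['H', 'D', 'F', 'C'] := rfl
theorem pv_tl_ICIC : ("ICIC" : String).toList = ['I', 'C', 'I', 'C'] := rfl
theorem pv_tl_AXIS : ("AXIS" : String).toList = ['A', 'X', 'I', 'S'] := rfl
theorem pv_tl_PUNB : ("PUNB" : String).toList = ['P', 'U', 'N', 'B'] := rfl
theorem pv_tl_BARB : ("BARB" : String).toList = ['B', 'A', 'R', 'B'] := rfl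
theorem pv_tl_MAHB : ("MAHB" : String).toList = ['M', 'A', 'H', 'B'] := rfl
theorem pv_tl_CNRB : ("CNRB" : String).toList = ['C', 'N', 'R', 'B'] := rfl
theorem pv_tl_UBIN : ("UBIN" : String).toList = ['U', 'B', 'I', 'N'] := rfl
theorem pv_tl_KKBK : ("KKBK" : String).toList = ['K', 'K', 'B', 'K'] := rfl

-- the scan over the ten prefixes equals the first-character dispatch + one test
theorem pv_scan_eq_dispatch (l : List Char) :
    pvScanA l pvBankPairsA
      = (match l with
         | [] => none
         | c :: rest =>
           match pvCandB c with
           | none => none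
           | some (p, b) =>
             if PySem.Chars.startswith (c :: rest) p.toList then some b else none) := by
  cases l with
  | nil =>
    simp [pvScanA, pvBankPairsA, pv_sw_nil, pv_tl_SBIN, pv_tl_HDFC, pv_tl_ICIC, pv_tl_AXIS, pv_tl_PUNB, pv_tl_BARB, pv_tl_MAHB, pv_tl_CNRB, pv_tl_UBIN, pv_tl_KKBK]
  | cons c rest =>
    simp only [pvScanA, pvBankPairsA, pvCandB]
    by_cases hS : c = 'S'
    · simp [hS, pv_sw_cons, pv_tl_SBIN, pv_tl_HDFC, pv_tl_ICIC, pv_tl_AXIS, pv_tl_PUNB, pv_tl_BARB, pv_tl_MAHB, pv_tl_CNRB, pv_tl_UBIN, pv_tl_KKBK]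
    by_cases hH : c = 'H'
    · simp [hH, pv_sw_cons, pv_tl_SBIN, pv_tl_HDFC, pv_tl_ICIC, pv_tl_AXIS, pv_tl_PUNB, pv_tl_BARB, pv_tl_MAHB, pv_tl_CNRB, pv_tl_UBIN, pv_tl_KKBK]
    by_cases hI : c = 'I'
    · simp [hI, pv_sw_cons, pv_tl_SBIN, pv_tl_HDFC, pv_tl_ICIC, pv_tl_AXIS, pv_tl_PUNB, pv_tl_BARB, pv_tl_MAHB, pv_tl_CNRB, pv_tl_UBIN, pv_tl_KKBK]
    by_cases hA : c = 'A'
    · simp [hA, pv_sw_cons, pv_tl_SBIN, pv_tl_HDFC, pv_tl_ICIC, pv_tl_AXIS, pv_tl_PUNB, pv_tl_BARB, pv_tl_MAHB, pv_tl_CNRB, pv_tl_UBIN, pv_tl_KKBK]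
    by_cases hP : c = 'P'
    · simp [hP, pv_sw_cons, pv_tl_SBIN, pv_tl_HDFC, pv_tl_ICIC, pv_tl_AXIS, pv_tl_PUNB, pv_tl_BARB, pv_tl_MAHB, pv_tl_CNRB, pv_tl_UBIN, pv_tl_KKBK]
    by_cases hB : c = 'B'
    · simp [hB, pv_sw_cons, pv_tl_SBIN, pv_tl_HDFC, pv_tl_ICIC, pv_tl_AXIS, pv_tl_PUNB, pv_tl_BARB, pv_tl_MAHB, pv_tl_CNRB, pv_tl_UBIN, pv_tl_KKBK]
    by_cases hM : c = 'M'
    · simp [hM, pv_sw_cons, pv_tl_SBIN, pv_tl_HDFC, pv_tl_ICIC, pv_tl_AXIS, pv_tl_PUNB, pv_tl_BARB, pv_tl_MAHB, pv_tl_CNRB, pv_tl_UBIN, pv_tl_KKBK]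
    by_cases hC : c = 'C'
    · simp [hC, pv_sw_cons, pv_tl_SBIN, pv_tl_HDFC, pv_tl_ICIC, pv_tl_AXIS, pv_tl_PUNB, pv_tl_BARB, pv_tl_MAHB, pv_tl_CNRB, pv_tl_UBIN, pv_tl_KKBK]
    by_cases hU : c = 'U'
    · simp [hU, pv_sw_cons, pv_tl_SBIN, pv_tl_HDFC, pv_tl_ICIC, pv_tl_AXIS, pv_tl_PUNB, pv_tl_BARB, pv_tl_MAHB, pv_tl_CNRB, pv_tl_UBIN, pv_tl_KKBK]
    by_cases hK : c = 'K'
    · simp [hK, pv_sw_cons, pv_tl_SBIN, pv_tl_HDFC, pv_tl_ICIC, pv_tl_AXIS, pv_tl_PUNB, pv_tl_BARB, pv_tl_MAHB, pv_tl_CNRB, pv_tl_UBIN, pv_tl_KKBK]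
    simp [pv_sw_cons, pv_tl_SBIN, pv_tl_HDFC, pv_tl_ICIC, pv_tl_AXIS, pv_tl_PUNB, pv_tl_BARB, pv_tl_MAHB, pv_tl_CNRB, pv_tl_UBIN, pv_tl_KKBK, hS, hH, hI, hA, hP, hB, hM, hC, hU, hK, Ne.symm hS, Ne.symm hH, Ne.symm hI, Ne.symm hA, Ne.symm hP, Ne.symm hB, Ne.symm hM, Ne.symm hC, Ne.symm hU, Ne.symm hK]

-- ===== VERDICT (by name: the statement is the Claim_ definition above) =====
theorem extract_bank_from_utr_spec : Claim_equal_extract_bank_from_utr := by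
  intro utr _
  unfold Spec_extract_bank_from_utr extract_bank_from_utr extract_bank_from_utr_alt
  exact pv_scan_eq_dispatch _
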